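-- pv_equiv track=rewrite | github.com/meerk40t/meerk40t | meerk40t/ruida/rdjob.py | determine_magic_via_histogram
-- ===== SOURCE A (Python) =====
-- def determine_magic_via_histogram(data):
--     """
--     Determines magic number via histogram. The number which occurs most in RDWorks files is overwhelmingly 0. It's
--     about 50% of all data. The swizzle algorithm means that the swizzle for 0 is magic + 1, so we find the most
--     frequent number and subtract one from that and that is *most* likely the magic number.
--
--     @param data:
--     @return:
--     """
--     histogram = [0] * 256
--     prev = -1
--     for d in data:
--         histogram[d] += 5 if prev == d else 1
--         prev = d
--     m = 0
--     magic = None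
--     for i in range(len(histogram)):
--         v = histogram[i]
--         if v > m:
--             m = v
--             magic = i - 1
--     return magic
-- ===== SOURCE B (Python) =====
-- def determine_magic_via_histogram(data):
--     # Run-length decomposition: each maximal run of length L adds 5*L - 4 to its
--     # bucket (= +1 for the first byte, +5 per repeat), then first-max argmax.
--     histogram = [0] * 256
--     rest = data
--     while rest:
--         v = rest[0]
--         run = 1
--         while run < len(rest) and rest[run] == v:
--             run += 1
--         histogram[v] += 5 * run - 4
--         rest = rest[run:]
--     best = 0
--     for k in range(1, 256):
--         if histogram[k] > histogram[best]:
--             best = k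
--     return best - 1 if histogram[best] > 0 else None
-- ===== Notes on version B (the rewrite author's own statement) =====
-- stated objective: alternative
-- what changed: Replaces the per-byte loop with a prev sentinel by run-length decomposition (each maximal run of length L adds 5*L-4 to its bucket) and the threshold scan by a first-max argmax index with a final positivity check; Pre_ excludes lists with an element too large or too negative to index the 256-slot histogram, where A raises IndexError, and lists starting with -1, where A's prev=-1 sentinel collides with the wraparound-only value -1 and miscounts the first byte as a repeat.
-- outside the precondition, e.g. on determine_magic_via_histogram([-1, -1, 0, 0]): A returns 254, B returns -1
import Mathlib
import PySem

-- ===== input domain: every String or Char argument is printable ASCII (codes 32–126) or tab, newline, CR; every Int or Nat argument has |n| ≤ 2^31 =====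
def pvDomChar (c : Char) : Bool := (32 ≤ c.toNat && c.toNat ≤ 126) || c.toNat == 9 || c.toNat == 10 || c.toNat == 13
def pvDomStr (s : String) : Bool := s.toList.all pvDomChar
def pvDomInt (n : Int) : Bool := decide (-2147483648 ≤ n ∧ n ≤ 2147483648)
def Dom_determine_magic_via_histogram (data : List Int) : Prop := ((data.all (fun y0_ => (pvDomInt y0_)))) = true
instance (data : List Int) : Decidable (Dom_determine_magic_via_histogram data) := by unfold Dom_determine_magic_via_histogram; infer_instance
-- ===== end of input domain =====

-- B replaces A's per-byte prev-sentinel loop by run-length decomposition (each maximal run of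
-- length L adds 5*L-4 to its bucket) and A's threshold scan by a first-max argmax index with a
-- final positivity check; objective: alternative (same cost, different decomposition).

-- ===== PORT A =====
def determine_magic_via_histogram (data : List Int) : Option Int :=
  let histogram : List Int := List.replicate 256 0
  let st := data.foldl (fun (st : List Int × Int) d =>
    (PySem.List.pySetD st.1 d (PySem.List.pyGetD st.1 d 0 + (if st.2 == d then 5 else 1)), d))
    (histogram, -1)
  let res := (PySem.List.pyRange 0 (PySem.List.len st.1) 1).foldl
    (fun (mm : Int × Option Int) i =>
      let v := PySem.List.pyGetD st.1 i 0
      if v > mm.1 then (v, some (i - 1)) else mm) ((0 : Int), (none : Option Int))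
  res.2

-- ===== PORT B =====
-- inner 'while run < len(rest) and rest[run] == v' loop of Source B: length of the prefix of xs equal
-- to v, together with the remainder rest[run:] (counted from rest[1:], hence the +1 in pvBuild).
def pvSpan (v : Int) : List Int → Nat × List Int
  | [] => (0, [])
  | x :: xs => if x == v then ((pvSpan v xs).1 + 1, (pvSpan v xs).2) else (0, x :: xs)

theorem pvSpan_snd_length_le (v : Int) (xs : List Int) : (pvSpan v xs).2.length ≤ xs.length := by
  induction xs with
  | nil => simp [pvSpan]
  | cons x xs ih =>
    simp only [pvSpan]
    split
    · exact Nat.le_trans ih (Nat.le_succ _)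
    · simp

-- outer 'while rest:' loop of Source B
def pvBuild (h : List Int) : List Int → List Int
  | [] => h
  | x :: xs =>
    pvBuild (PySem.List.pySetD h x
      (PySem.List.pyGetD h x 0 + (5 * (((pvSpan x xs).1 : Int) + 1) - 4))) (pvSpan x xs).2
termination_by l => l.length
decreasing_by
  have := pvSpan_snd_length_le x xs
  simp; omega

def determine_magic_via_histogram_alt (data : List Int) : Option Int :=
  let histogram := pvBuild (List.replicate 256 0) data
  let best := (PySem.List.pyRange 1 256 1).foldl
    (fun (best : Int) k =>
      if PySem.List.pyGetD histogram k 0 > PySem.List.pyGetD histogram best 0 then k else best)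
    (0 : Int)
  if PySem.List.pyGetD histogram best 0 > 0 then some (best - 1) else none

-- ===== PRECONDITION & SPEC =====
-- Pre_ excludes lists with an element too large or too negative to index the 256-slot histogram,
-- on which A raises IndexError, and lists whose first element is -1, where A's prev = -1 sentinel
-- collides with that (wraparound-only) data value and counts the very first byte as a repeat.
def Pre_determine_magic_via_histogram (data : List Int) : Prop :=
  (∀ d ∈ data, -256 ≤ d ∧ d < 256) ∧ data.head? ≠ some (-1)
instance (data : List Int) : Decidable (Pre_determine_magic_via_histogram data) := by
  unfold Pre_determine_magic_via_histogram; infer_instance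

def pvWitness_determine_magic_via_histogram : List Int := [0, 5, 5, 255, -2]

def Spec_determine_magic_via_histogram (data : List Int) (out : Option Int) : Prop :=
  out = determine_magic_via_histogram_alt data
instance (data : List Int) (out : Option Int) :
    Decidable (Spec_determine_magic_via_histogram data out) := by
  unfold Spec_determine_magic_via_histogram; infer_instance

-- ===== CLAIM (what is proved, stated in full; the proofs are below) =====
def Claim_equal_determine_magic_via_histogram : Prop :=
  ∀ (data : List Int), Dom_determine_magic_via_histogram data →
    Pre_determine_magic_via_histogram data →
    Spec_determine_magic_via_histogram data (determine_magic_via_histogram data)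

-- ===== LEMMAS AND PROOFS =====

-- normalized nonnegative index of a (possibly negative, in-range) Python index
def pvNidx (L : Nat) (i : Int) : Nat := (if i < 0 then i + L else i).toNat

theorem pvSetD_norm (xs : List Int) (i v : Int) (h1 : -(xs.length : Int) ≤ i)
    (h2 : i < xs.length) : PySem.List.pySetD xs i v = xs.set (pvNidx xs.length i) v := by
  unfold pvNidx
  simp only [PySem.List.pySetD, PySem.List.pySet?, PySem.List.pyIdx?]
  by_cases h : i < 0
  · rw [if_neg (by omega), if_pos h1, if_pos h]
    simp only [Option.map_some, Option.getD_some]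
    congr 1
    omega
  · rw [if_pos (by omega), if_pos h2, if_neg h]
    simp only [Option.map_some, Option.getD_some]

theorem pvGetD_norm (xs : List Int) (i d : Int) (h1 : -(xs.length : Int) ≤ i)
    (h2 : i < xs.length) : PySem.List.pyGetD xs i d = xs.getD (pvNidx xs.length i) d := by
  unfold pvNidx
  simp only [PySem.List.pyGetD, PySem.List.pyGet?, PySem.List.pyIdx?, List.getD]
  by_cases h : i < 0
  · rw [if_neg (by omega), if_pos h1, if_pos h]
    simp only [Option.bind_some]
    congr 2
    omega
  · rw [if_pos (by omega), if_pos h2, if_neg h]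
    simp only [Option.bind_some]

theorem pvGetD_out (xs : List Int) (i d : Int)
    (h : i < -(xs.length : Int) ∨ (xs.length : Int) ≤ i) : PySem.List.pyGetD xs i d = d := by
  simp only [PySem.List.pyGetD, PySem.List.pyGet?, PySem.List.pyIdx?]
  by_cases h' : i < 0
  · rw [if_neg (by omega), if_neg (by omega)]; rfl
  · rw [if_pos (by omega), if_neg (by omega)]; rfl

theorem pvNidx_lt (L : Nat) (i : Int) (h1 : -(L : Int) ≤ i) (h2 : i < L) : pvNidx L i < L := by
  unfold pvNidx; split <;> omega

-- in-range read-after-write and write-after-write at the same Python index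
theorem pvGetD_setD_self (h : List Int) (x v : Int) (hl : h.length = 256)
    (h1 : -256 ≤ x) (h2 : x < 256) :
    PySem.List.pyGetD (PySem.List.pySetD h x v) x 0 = v := by
  rw [pvSetD_norm h x v (by omega) (by omega)]
  rw [pvGetD_norm _ x 0 (by simp; omega) (by simp; omega)]
  rw [List.length_set]
  unfold List.getD
  rw [List.getElem?_set_self (by rw [hl]; exact pvNidx_lt 256 x (by omega) (by omega))]
  rfl

theorem pvSetD_setD_self (h : List Int) (x v w : Int) (hl : h.length = 256)
    (h1 : -256 ≤ x) (h2 : x < 256) :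
    PySem.List.pySetD (PySem.List.pySetD h x v) x w = PySem.List.pySetD h x w := by
  rw [pvSetD_norm h x v (by omega) (by omega)]
  rw [pvSetD_norm _ x w (by simp; omega) (by simp; omega)]
  rw [pvSetD_norm h x w (by omega) (by omega), List.length_set, List.set_set]

theorem pvLength_setD (h : List Int) (x v : Int) :
    (PySem.List.pySetD h x v).length = h.length := by
  simp only [PySem.List.pySetD, PySem.List.pySet?, PySem.List.pyIdx?]
  split <;> split <;> simp

-- A's per-byte loop step
def pvStepA (st : List Int × Int) (d : Int) : List Int × Int :=
  (PySem.List.pySetD st.1 d (PySem.List.pyGetD st.1 d 0 + (if st.2 == d then 5 else 1)), d)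

theorem pvFoldA_length (data : List Int) : ∀ (h : List Int) (p : Int),
    (data.foldl pvStepA (h, p)).1.length = h.length := by
  induction data with
  | nil => intro h p; rfl
  | cons x xs ih =>
    intro h p
    rw [List.foldl_cons]
    show (xs.foldl pvStepA (pvStepA (h, p) x)).1.length = _
    rw [ih, pvStepA, pvLength_setD]

theorem pvSpan_decomp (v : Int) (xs : List Int) :
    xs = List.replicate (pvSpan v xs).1 v ++ (pvSpan v xs).2 ∧
    (∀ y, (pvSpan v xs).2.head? = some y → y ≠ v) := by
  induction xs with
  | nil => simp [pvSpan]
  | cons x xs ih =>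
    by_cases hx : x = v
    · simp only [pvSpan, hx, beq_self_eq_true, if_true]
      exact ⟨by rw [List.replicate_succ, List.cons_append]; exact congrArg _ ih.1, ih.2⟩
    · simp only [pvSpan, beq_iff_eq, hx, if_false]
      exact ⟨by simp, by intro y hy; simp at hy; omega⟩

-- running A over k repeats of x with prev = x adds 5 per element to bucket x
theorem pvRepeat (k : Nat) : ∀ (h : List Int) (x w : Int), h.length = 256 →
    -256 ≤ x → x < 256 →
    (List.replicate k x).foldl pvStepA (PySem.List.pySetD h x w, x)
      = (PySem.List.pySetD h x (w + 5 * k), x) := by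
  induction k with
  | zero => intro h x w _ _ _; simp
  | succ k ih =>
    intro h x w hl h1 h2
    rw [List.replicate_succ, List.foldl_cons]
    have hstep : pvStepA (PySem.List.pySetD h x w, x) x = (PySem.List.pySetD h x (w + 5), x) := by
      rw [pvStepA]
      simp only [beq_self_eq_true, if_true]
      rw [pvGetD_setD_self h x w hl h1 h2, pvSetD_setD_self h x _ _ hl h1 h2]
    rw [hstep, ih h x (w + 5) hl h1 h2]
    congr 1
    congr 1
    push_cast
    ring

theorem pvHistEqAux (N : Nat) : ∀ (data : List Int), data.length ≤ N →
    ∀ (h : List Int) (prev : Int), h.length = 256 →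
    (∀ d ∈ data, -256 ≤ d ∧ d < 256) → (∀ y, data.head? = some y → prev ≠ y) →
    (data.foldl pvStepA (h, prev)).1 = pvBuild h data := by
  induction N with
  | zero =>
    intro data hlen h prev _ _ _
    rw [List.length_eq_zero_iff.mp (Nat.le_zero.mp hlen)]
    simp [pvBuild]
  | succ M ih =>
    intro data hlen h prev hl hmem hhead
    match data with
    | [] => simp [pvBuild]
    | x :: xs =>
      obtain ⟨hdec, hresthead⟩ := pvSpan_decomp x xs
      have hx := hmem x (by simp)
      have hprev : prev ≠ x := hhead x rfl
      rw [List.foldl_cons]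
      have hstep : pvStepA (h, prev) x
          = (PySem.List.pySetD h x (PySem.List.pyGetD h x 0 + 1), x) := by
        rw [pvStepA]
        simp only [beq_iff_eq, hprev, if_false]
      rw [hstep]
      conv_lhs => rw [hdec]
      rw [List.foldl_append]
      rw [pvRepeat (pvSpan x xs).1 h x _ hl hx.1 hx.2]
      have hrlen : (pvSpan x xs).2.length ≤ M := by
        have := pvSpan_snd_length_le x xs
        simp at hlen; omega
      rw [ih (pvSpan x xs).2 hrlen _ x (by rw [pvLength_setD]; exact hl)
        (fun d hd => hmem d (List.mem_cons_of_mem x (by rw [hdec]; exact List.mem_append_right _ hd)))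
        (fun y hy => (hresthead y hy).symm)]
      show pvBuild _ _ = pvBuild h (x :: xs)
      conv_rhs => rw [pvBuild]
      congr 2
      ring

theorem pvGetD_set_nat (xs : List Int) (n j : Nat) (v d : Int) :
    (xs.set n v).getD j d = if j = n ∧ n < xs.length then v else xs.getD j d := by
  unfold List.getD
  by_cases hj : j = n
  · subst hj
    by_cases hn : j < xs.length
    · rw [List.getElem?_set_self hn]; simp [hn]
    · rw [List.set_eq_of_length_le (by omega)]; simp [hn]
  · rw [List.getElem?_set_ne (fun hc => hj hc.symm)]
    simp [hj]

theorem pvBuild_nonneg (N : Nat) : ∀ (data : List Int), data.length ≤ N →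
    ∀ (h : List Int), h.length = 256 →
    (∀ j : Nat, 0 ≤ h.getD j 0) → (∀ d ∈ data, -256 ≤ d ∧ d < 256) →
    ∀ j : Nat, 0 ≤ (pvBuild h data).getD j 0 := by
  induction N with
  | zero =>
    intro data hlen h _ hnn _ j
    rw [List.length_eq_zero_iff.mp (Nat.le_zero.mp hlen)]
    simpa [pvBuild] using hnn j
  | succ M ih =>
    intro data hlen h hl hnn hmem j
    match data with
    | [] => simpa [pvBuild] using hnn j
    | x :: xs =>
      obtain ⟨hdec, _⟩ := pvSpan_decomp x xs
      have hx := hmem x (by simp)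
      rw [pvBuild]
      have hrlen : (pvSpan x xs).2.length ≤ M := by
        have := pvSpan_snd_length_le x xs
        simp at hlen; omega
      refine ih (pvSpan x xs).2 hrlen _ (by rw [pvLength_setD]; exact hl) ?_
        (fun d hd => hmem d (List.mem_cons_of_mem x (by rw [hdec]; exact List.mem_append_right _ hd))) j
      intro j'
      rw [pvSetD_norm h x _ (by omega) (by omega), pvGetD_set_nat]
      split
      · have : PySem.List.pyGetD h x 0 = h.getD (pvNidx h.length x) 0 :=
          pvGetD_norm h x 0 (by omega) (by omega)
        rw [this]
        have := hnn (pvNidx h.length x)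
        omega
      · exact hnn j'

theorem pvNonneg_pyGetD (xs : List Int) (hj : ∀ j : Nat, 0 ≤ xs.getD j 0) (i : Int) :
    0 ≤ PySem.List.pyGetD xs i 0 := by
  by_cases hin : -(xs.length : Int) ≤ i ∧ i < xs.length
  · rw [pvGetD_norm xs i 0 hin.1 hin.2]; exact hj _
  · rw [pvGetD_out xs i 0 (by omega)]

-- the two argmax scans, related: A's (m, magic) state is determined by B's best index
theorem pvScanRel (H : List Int) (hn : ∀ i : Int, 0 ≤ PySem.List.pyGetD H i 0) :
    ∀ (l : List Int) (best : Int),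
    l.foldl (fun (mm : Int × Option Int) i =>
        if PySem.List.pyGetD H i 0 > mm.1 then (PySem.List.pyGetD H i 0, some (i - 1)) else mm)
      (PySem.List.pyGetD H best 0,
        if PySem.List.pyGetD H best 0 > 0 then some (best - 1) else none)
    = (PySem.List.pyGetD H (l.foldl (fun (b : Int) k =>
          if PySem.List.pyGetD H k 0 > PySem.List.pyGetD H b 0 then k else b) best) 0,
       if PySem.List.pyGetD H (l.foldl (fun (b : Int) k =>
            if PySem.List.pyGetD H k 0 > PySem.List.pyGetD H b 0 then k else b) best) 0 > 0
       then some ((l.foldl (fun (b : Int) k =>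
            if PySem.List.pyGetD H k 0 > PySem.List.pyGetD H b 0 then k else b) best) - 1)
       else none) := by
  intro l
  induction l with
  | nil => intro best; rfl
  | cons i l ihl =>
    intro best
    rw [List.foldl_cons, List.foldl_cons]
    by_cases hc : PySem.List.pyGetD H i 0 > PySem.List.pyGetD H best 0
    · rw [if_pos hc, if_pos hc]
      have hpos : PySem.List.pyGetD H i 0 > 0 := lt_of_le_of_lt (hn best) hc
      have : (PySem.List.pyGetD H i 0, some (i - 1))
          = (PySem.List.pyGetD H i 0,
             if PySem.List.pyGetD H i 0 > 0 then some (i - 1) else none) := by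
        rw [if_pos hpos]
      rw [this, ihl i]
    · rw [if_neg hc, if_neg hc]
      exact ihl best

-- the full argmax phase: A's scan over range(256) against B's scan over range(1,256) + final check
theorem pvScanFull (H : List Int) (hn : ∀ i : Int, 0 ≤ PySem.List.pyGetD H i 0) :
    ((PySem.List.pyRange 0 256 1).foldl
      (fun (mm : Int × Option Int) i =>
        if PySem.List.pyGetD H i 0 > mm.1 then (PySem.List.pyGetD H i 0, some (i - 1)) else mm)
      ((0 : Int), (none : Option Int))).2
    = (if PySem.List.pyGetD H ((PySem.List.pyRange 1 256 1).foldl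
          (fun (b : Int) k =>
            if PySem.List.pyGetD H k 0 > PySem.List.pyGetD H b 0 then k else b) 0) 0 > 0
       then some (((PySem.List.pyRange 1 256 1).foldl
          (fun (b : Int) k =>
            if PySem.List.pyGetD H k 0 > PySem.List.pyGetD H b 0 then k else b) 0) - 1)
       else none) := by
  rw [PySem.List.pyRange_one_cons (by norm_num), List.foldl_cons]
  rw [show (0 : Int) + 1 = 1 from rfl]
  have hrel := pvScanRel H hn (PySem.List.pyRange 1 256 1) 0
  by_cases h0 : PySem.List.pyGetD H 0 0 > (0 : Int)
  · rw [if_pos h0] at hrel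
    rw [if_pos (show PySem.List.pyGetD H 0 0 > ((0 : Int), (none : Option Int)).1 from h0)]
    rw [hrel]
  · have hz : PySem.List.pyGetD H 0 0 = 0 := le_antisymm (by omega) (hn 0)
    rw [hz, if_neg (by omega)] at hrel
    rw [if_neg (show ¬ PySem.List.pyGetD H 0 0 > ((0 : Int), (none : Option Int)).1 from h0)]
    rw [hrel]

-- ===== VERDICT (by name: the statement is the Claim_ definition above) =====
theorem determine_magic_via_histogram_spec : Claim_equal_determine_magic_via_histogram := by
  intro data _ hpre
  obtain ⟨hmem, hhead⟩ := hpre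
  unfold Spec_determine_magic_via_histogram
  simp only [determine_magic_via_histogram, determine_magic_via_histogram_alt]
  have hstep : (fun (st : List Int × Int) d =>
      (PySem.List.pySetD st.1 d (PySem.List.pyGetD st.1 d 0 + (if st.2 == d then 5 else 1)), d))
      = pvStepA := rfl
  rw [hstep]
  have hH : (data.foldl pvStepA (List.replicate 256 0, -1)).1
      = pvBuild (List.replicate 256 0) data := by
    refine pvHistEqAux data.length data le_rfl _ (-1) (List.length_replicate) hmem ?_
    intro y hy hc
    exact hhead (hc ▸ hy)
  have hnn0 : ∀ j : Nat, 0 ≤ (List.replicate 256 (0 : Int)).getD j 0 := by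
    intro j
    rw [List.getD_eq_getElem?_getD, List.getElem?_replicate]
    split <;> simp
  have hn : ∀ i : Int, 0 ≤ PySem.List.pyGetD (pvBuild (List.replicate 256 0) data) i 0 :=
    pvNonneg_pyGetD _ (pvBuild_nonneg data.length data le_rfl _ List.length_replicate hnn0 hmem)
  have hlen : (pvBuild (List.replicate 256 0) data).length = 256 := by
    rw [← hH, pvFoldA_length, List.length_replicate]
  rw [hH, PySem.List.len_eq, hlen]
  rw [show (((256 : Nat) : Int)) = (256 : Int) from rfl]
  exact pvScanFull (pvBuild (List.replicate 256 0) data) hn
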